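-- pv_equiv track=rewrite | github.com/gitlost-murali/t5ner | mitrestaurants/mitres_make_t5_template.py | templatize_function
-- ===== SOURCE A (Python) =====
-- tag_descriptor = {
-- "Rating": "Rating",
-- "Amenity": "Amenity",
-- "Location": "Location",
-- "Restaurant_Name": "Restaurant Name",
-- "Price": "Price",
-- "Hours": "Hours",
-- "Dish":"Dish",
-- "Cuisine": "Cuisine",
-- }
--
-- def templatize_function(sentence_text, entity_text, entity_tags, template_type):
--     """
--     Sentence Text: Normal textual sentence
--     Entity Text: ['London', 'Iraq', 'British'],
--     Entity Tags: ['Geographical Entity', 'Geographical Entity', 'Geopolitical Entity']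
--     """
--
--     if template_type == 1:
--         target_template = ""
--         input_template = f"ner: {sentence_text}"
--         for ent, tg in zip(entity_text, entity_tags):
--             target_template += f"{ent} [{tg}] "
--
--         target_template = target_template.strip()
--         target_template = [target_template]
--         input_template = [input_template]
--
--     if template_type == 2:
--         input_template = []
--         target_template = []
--         ents_per_tok = dict()
--         ## Create a bucket that stores entities per tag
--         for tag, tok in zip(entity_tags, entity_text):
--             ents_per_tok[tag] = ents_per_tok.get(tag, []) + [tok]
--
--         tagnames = []
--         for tagname, dscr in tag_descriptor.items():
--             input_template.append(f"ner: {sentence_text}, the '{dscr}' entities in the sentence are ")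
--             if tagname in entity_tags:
--                 target_template.append(f"{ ', '.join(ents_per_tok.get(tagname, 'None')) }")
--             else:
--                 target_template.append("None")
--
--             tagnames.append(tagname)
--
--     return input_template, target_template, tagnames
-- ===== SOURCE B (Python) =====
-- tag_descriptor = {
-- "Rating": "Rating",
-- "Amenity": "Amenity",
-- "Location": "Location",
-- "Restaurant_Name": "Restaurant Name",
-- "Price": "Price",
-- "Hours": "Hours",
-- "Dish":"Dish",
-- "Cuisine": "Cuisine",
-- }
--
-- def templatize_function(sentence_text, entity_text, entity_tags, template_type):
--     if template_type != 2:
--         raise ValueError("unsupported template_type")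
--     input_template, target_template, tagnames = [], [], []
--     pairs = list(zip(entity_text, entity_tags))
--     for tagname, dscr in tag_descriptor.items():
--         matches = [tok for tok, tg in pairs if tg == tagname]
--         input_template.append(f"ner: {sentence_text}, the '{dscr}' entities in the sentence are ")
--         target_template.append(", ".join(matches) if matches else "None")
--         tagnames.append(tagname)
--     return input_template, target_template, tagnames
-- ===== Notes on version B (the rewrite author's own statement) =====
-- stated objective: simpler
-- what changed: B drops A's per-tag bucket dictionary entirely: for each descriptor tag it filters the zipped (token, tag) pairs directly and decides the 'None' case by emptiness of that match list instead of list membership plus a dict lookup with a string default.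
-- intended difference: On inputs with template_type 2 where some descriptor tag occurs in entity_tags but only at positions beyond len(entity_text) (so zip truncates it away), A joins the characters of the default string 'None' and returns 'N, o, n, e' for that tag, while B returns 'None', the obviously intended empty-bucket answer. — e.g. on templatize_function("hi", [], ["Rating"], 2): A returns (["ner: hi, the 'Rating' entities in the sentence are ", "ner: hi, the 'Amenity' entities in the sentence are ", "ner: …, B returns (["ner: hi, the 'Rating' entities in the sentence are ", "ner: hi, the 'Amenity' entities in the sentence are ", "ner: …
import Mathlib
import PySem

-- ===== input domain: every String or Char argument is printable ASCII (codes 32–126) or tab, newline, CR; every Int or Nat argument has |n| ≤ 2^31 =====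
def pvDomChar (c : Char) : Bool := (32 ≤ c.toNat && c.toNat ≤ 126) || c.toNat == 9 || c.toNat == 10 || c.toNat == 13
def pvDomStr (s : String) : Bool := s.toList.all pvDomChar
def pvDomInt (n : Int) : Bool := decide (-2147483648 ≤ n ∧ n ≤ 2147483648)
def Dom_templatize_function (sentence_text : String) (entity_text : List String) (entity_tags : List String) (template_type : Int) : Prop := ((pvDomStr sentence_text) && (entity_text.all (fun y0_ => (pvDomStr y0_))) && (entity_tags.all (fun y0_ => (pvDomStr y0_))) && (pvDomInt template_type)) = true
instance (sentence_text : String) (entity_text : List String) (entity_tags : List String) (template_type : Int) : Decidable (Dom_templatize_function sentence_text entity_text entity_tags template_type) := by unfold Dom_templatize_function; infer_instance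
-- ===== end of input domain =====

-- B replaces A's per-tag bucket dictionary by a direct filter of the zipped (token, tag)
-- pairs per descriptor tag, deciding the 'None' case by emptiness of the match list
-- (objective: simpler; not faster). A returns only for template_type == 2 (Pre_); on the
-- D_ corner below A's dict default joins the characters of 'None', B returns 'None'.

-- ===== PORT A =====
-- tag_descriptor.items() (insertion order, unique keys)
def pvTagItems : List (String × String) :=
  [("Rating", "Rating"), ("Amenity", "Amenity"), ("Location", "Location"),
   ("Restaurant_Name", "Restaurant Name"), ("Price", "Price"), ("Hours", "Hours"),
   ("Dish", "Dish"), ("Cuisine", "Cuisine")]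

-- ents_per_tok[tag] = ents_per_tok.get(tag, []) + [tok]
def pvBucketStep (d : PySem.Dict String (List String)) (p : String × String) : PySem.Dict String (List String) :=
  d.insert p.1 (d.getD p.1 [] ++ [p.2])

def templatize_function (sentence_text : String) (entity_text : List String) (entity_tags : List String) (template_type : Int) : List String × List String × List String :=
  if template_type = 2 then
    let ents_per_tok := (List.zip entity_tags entity_text).foldl pvBucketStep PySem.Dict.empty
    pvTagItems.foldl (fun acc item =>
      (acc.1 ++ ["ner: " ++ sentence_text ++ ", the '" ++ item.2 ++ "' entities in the sentence are "],
       acc.2.1 ++ [if entity_tags.contains item.1 then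
            (match ents_per_tok.get? item.1 with
             | some l => PySem.Str.join ", " l
             -- Python's ', '.join(ents_per_tok.get(tagname, 'None')) joins the CHARACTERS
             -- of the default string 'None' when the key is absent
             | none => PySem.Str.join ", " ["N", "o", "n", "e"])
          else "None"],
       acc.2.2 ++ [item.1])) ([], [], [])
  else
    -- for template_type ≠ 2 Python raises UnboundLocalError (tagnames / input_template
    -- never assigned); excluded by Pre_templatize_function
    ([], [], [])

-- ===== PORT B =====
def templatize_function_alt (sentence_text : String) (entity_text : List String) (entity_tags : List String) (template_type : Int) : List String × List String × List String :=
  if template_type = 2 then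
    let pairs := List.zip entity_text entity_tags
    pvTagItems.foldl (fun acc item =>
      (acc.1 ++ ["ner: " ++ sentence_text ++ ", the '" ++ item.2 ++ "' entities in the sentence are "],
       -- Python's local 'matches' ('matches' is a Lean keyword)
       acc.2.1 ++ [let toks := ((pairs.filter (fun p => p.2 == item.1)).map Prod.fst)
                   if toks.isEmpty then "None" else PySem.Str.join ", " toks],
       acc.2.2 ++ [item.1])) ([], [], [])
  else
    ([], [], [])

-- ===== PRECONDITION & SPEC =====
-- A raises UnboundLocalError for every template_type other than 2 (including 1)
def Pre_templatize_function (sentence_text : String) (entity_text : List String) (entity_tags : List String) (template_type : Int) : Prop := template_type = 2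
instance (sentence_text : String) (entity_text : List String) (entity_tags : List String) (template_type : Int) : Decidable (Pre_templatize_function sentence_text entity_text entity_tags template_type) := by unfold Pre_templatize_function; infer_instance

def pvWitness_templatize_function : String × List String × List String × Int := ("hi", ["a"], ["Dish"], 2)

-- On template_type-2 inputs where some descriptor tag occurs in entity_tags but only at
-- positions ≥ len(entity_text) (zip truncates it away), A joins the characters of the
-- dict default 'None' and returns 'N, o, n, e' for that tag while B returns 'None',
-- the intended empty-bucket answer.
def D_templatize_function (sentence_text : String) (entity_text : List String) (entity_tags : List String) (template_type : Int) : Prop :=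
  template_type = 2 ∧
  ∃ t ∈ pvTagItems.map Prod.fst,  -- t a key of the module constant tag_descriptor
    t ∈ entity_tags ∧ t ∉ entity_tags.take entity_text.length
instance (sentence_text : String) (entity_text : List String) (entity_tags : List String) (template_type : Int) : Decidable (D_templatize_function sentence_text entity_text entity_tags template_type) := by unfold D_templatize_function; infer_instance

def Spec_templatize_function (sentence_text : String) (entity_text : List String) (entity_tags : List String) (template_type : Int) (out : List String × List String × List String) : Prop := ¬ D_templatize_function sentence_text entity_text entity_tags template_type → out = templatize_function_alt sentence_text entity_text entity_tags template_type
instance (sentence_text : String) (entity_text : List String) (entity_tags : List String) (template_type : Int) (out : List String × List String × List String) : Decidable (Spec_templatize_function sentence_text entity_text entity_tags template_type out) := by unfold Spec_templatize_function; infer_instance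

def pvDiffWitness_templatize_function : String × List String × List String × Int := ("hi", [], ["Rating"], 2)
def pvDiffWitnessOut_templatize_function : (List String × List String × List String) × (List String × List String × List String) :=
  ((["ner: hi, the 'Rating' entities in the sentence are ", "ner: hi, the 'Amenity' entities in the sentence are ", "ner: hi, the 'Location' entities in the sentence are ", "ner: hi, the 'Restaurant Name' entities in the sentence are ", "ner: hi, the 'Price' entities in the sentence are ", "ner: hi, the 'Hours' entities in the sentence are ", "ner: hi, the 'Dish' entities in the sentence are ", "ner: hi, the 'Cuisine' entities in the sentence are "],
    ["N, o, n, e", "None", "None", "None", "None", "None", "None", "None"],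
    ["Rating", "Amenity", "Location", "Restaurant_Name", "Price", "Hours", "Dish", "Cuisine"]),
   (["ner: hi, the 'Rating' entities in the sentence are ", "ner: hi, the 'Amenity' entities in the sentence are ", "ner: hi, the 'Location' entities in the sentence are ", "ner: hi, the 'Restaurant Name' entities in the sentence are ", "ner: hi, the 'Price' entities in the sentence are ", "ner: hi, the 'Hours' entities in the sentence are ", "ner: hi, the 'Dish' entities in the sentence are ", "ner: hi, the 'Cuisine' entities in the sentence are "],
    ["None", "None", "None", "None", "None", "None", "None", "None"],
    ["Rating", "Amenity", "Location", "Restaurant_Name", "Price", "Hours", "Dish", "Cuisine"]))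

-- ===== CLAIM (what is proved, stated in full; the proofs are below) =====
def Claim_unchanged_templatize_function : Prop := ∀ (sentence_text : String) (entity_text : List String) (entity_tags : List String) (template_type : Int), Dom_templatize_function sentence_text entity_text entity_tags template_type → Pre_templatize_function sentence_text entity_text entity_tags template_type → Spec_templatize_function sentence_text entity_text entity_tags template_type (templatize_function sentence_text entity_text entity_tags template_type)
def Claim_changed_templatize_function : Prop := Dom_templatize_function (pvDiffWitness_templatize_function.1) (pvDiffWitness_templatize_function.2.1) (pvDiffWitness_templatize_function.2.2.1) (pvDiffWitness_templatize_function.2.2.2) ∧ Pre_templatize_function (pvDiffWitness_templatize_function.1) (pvDiffWitness_templatize_function.2.1) (pvDiffWitness_templatize_function.2.2.1) (pvDiffWitness_templatize_function.2.2.2) ∧ D_templatize_function (pvDiffWitness_templatize_function.1) (pvDiffWitness_templatize_function.2.1) (pvDiffWitness_templatize_function.2.2.1) (pvDiffWitness_templatize_function.2.2.2) ∧ templatize_function (pvDiffWitness_templatize_function.1) (pvDiffWitness_templatize_function.2.1) (pvDiffWitness_templatize_function.2.2.1) (pvDiffWitness_templatize_function.2.2.2) = pvDiffWitnessOut_templatize_function.1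 ∧ templatize_function_alt (pvDiffWitness_templatize_function.1) (pvDiffWitness_templatize_function.2.1) (pvDiffWitness_templatize_function.2.2.1) (pvDiffWitness_templatize_function.2.2.2) = pvDiffWitnessOut_templatize_function.2 ∧ pvDiffWitnessOut_templatize_function.1 ≠ pvDiffWitnessOut_templatize_function.2
def Claim_exact_templatize_function : Prop := ∀ (sentence_text : String) (entity_text : List String) (entity_tags : List String) (template_type : Int), Dom_templatize_function sentence_text entity_text entity_tags template_type → Pre_templatize_function sentence_text entity_text entity_tags template_type → D_templatize_function sentence_text entity_text entity_tags template_type → templatize_function sentence_text entity_text entity_tags template_type ≠ templatize_function_alt sentence_text entity_text entity_tags template_type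

-- ===== LEMMAS AND PROOFS =====

-- both ports' loops append one element to each of the three accumulators per item
theorem pv_foldl_triple {α : Type} (f g h : α → String) (l : List α) (a b c : List String) :
    l.foldl (fun acc x => (acc.1 ++ [f x], acc.2.1 ++ [g x], acc.2.2 ++ [h x])) (a, b, c)
      = (a ++ l.map f, b ++ l.map g, c ++ l.map h) := by
  induction l generalizing a b c with
  | nil => simp
  | cons x xs ih => simp [ih]

theorem pv_map_fst_zip_take {α β : Type} : ∀ (l1 : List α) (l2 : List β),
    (l1.zip l2).map Prod.fst = l1.take l2.length := by
  intro l1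
  induction l1 with
  | nil => intro l2; simp
  | cons x xs ih =>
    intro l2
    cases l2 with
    | nil => simp
    | cons y ys => simp [ih]

-- the bucket dict built by A's grouping loop, characterised by filter
theorem pv_bucket_get? : ∀ (pairs : List (String × String)) (d : PySem.Dict String (List String)) (t : String),
    (pairs.foldl pvBucketStep d).get? t =
      match d.get? t with
      | some l => some (l ++ (pairs.filter (fun p => p.1 == t)).map Prod.snd)
      | none =>
        if (pairs.map Prod.fst).contains t
        then some ((pairs.filter (fun p => p.1 == t)).map Prod.snd)
        else none := by
  intro pairs
  induction pairs with
  | nil => intro d t; cases hd : d.get? t <;> simp [hd]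
  | cons p rest ih =>
    intro d t
    obtain ⟨a, b⟩ := p
    simp only [List.foldl_cons]
    rw [ih]
    by_cases hat : a = t
    · subst hat
      rw [show (pvBucketStep d (a, b)).get? a = some (d.getD a [] ++ [b]) from
        PySem.Dict.get?_insert_self _ _ _]
      cases hd : d.get? a <;>
        simp [hd, PySem.Dict.getD, List.filter_cons]
    · rw [show (pvBucketStep d (a, b)).get? t = d.get? t from
        PySem.Dict.get?_insert_of_ne _ _ (Ne.symm hat)]
      have hcc : (a :: List.map Prod.fst rest).contains t = (List.map Prod.fst rest).contains t := by
        simp [List.contains_cons, Ne.symm hat]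
      have hf : List.filter (fun p => p.1 == t) ((a, b) :: rest) = List.filter (fun p => p.1 == t) rest := by
        simp [List.filter_cons, hat]
      rw [hf, List.map_cons, hcc]

-- swapping the zip order swaps the filtered projection
theorem pv_zip_swap_filter (t : String) : ∀ (etext etags : List String),
    ((List.zip etext etags).filter (fun p => p.2 == t)).map Prod.fst
      = ((List.zip etags etext).filter (fun p => p.1 == t)).map Prod.snd := by
  intro etext
  induction etext with
  | nil => intro etags; simp
  | cons x xs ih =>
    intro etags
    cases etags with
    | nil => simp
    | cons y ys =>
      by_cases hy : y = t <;> simp [List.filter_cons, hy, ih]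

theorem pv_filter_nil_of_not_mem (t : String) (pairs : List (String × String))
    (h : t ∉ pairs.map Prod.fst) : pairs.filter (fun p => p.1 == t) = [] := by
  rw [List.filter_eq_nil_iff]
  intro p hp hpt
  exact h (List.mem_map.mpr ⟨p, hp, by simpa using hpt⟩)

-- per-tag equality of the two target entries, assuming the quirk corner is excluded for t
theorem pv_entry_eq (etext etags : List String) (t : String)
    (h : t ∈ etags → t ∈ (List.zip etags etext).map Prod.fst) :
    (if etags.contains t then
      (match ((List.zip etags etext).foldl pvBucketStep PySem.Dict.empty).get? t with
       | some l => PySem.Str.join ", " l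
       | none => PySem.Str.join ", " ["N", "o", "n", "e"])
     else "None")
    = (let toks := (((List.zip etext etags).filter (fun p => p.2 == t)).map Prod.fst)
       if toks.isEmpty then "None" else PySem.Str.join ", " toks) := by
  rw [pv_bucket_get?]
  rw [pv_zip_swap_filter]
  by_cases hc : t ∈ etags
  · have hz : t ∈ (List.zip etags etext).map Prod.fst := h hc
    have hne : (List.zip etags etext).filter (fun p => p.1 == t) ≠ [] := by
      intro hnil
      obtain ⟨p, hp, hpt⟩ := List.mem_map.mp hz
      have := List.filter_eq_nil_iff.mp hnil p hp
      simp [hpt] at this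
    simp [hc, List.contains_iff_mem, hz, PySem.Dict.get?, PySem.Dict.empty,
      List.isEmpty_iff, hne]
  · have hz : t ∉ (List.zip etags etext).map Prod.fst := by
      intro hmem
      obtain ⟨p, hp, hpt⟩ := List.mem_map.mp hmem
      exact hc (hpt ▸ (List.of_mem_zip hp).1)
    rw [pv_filter_nil_of_not_mem t _ hz]
    simp [hc, PySem.Dict.get?, PySem.Dict.empty]

-- ===== VERDICT (by name: the statement is the Claim_ definition above) =====
theorem templatize_function_spec : Claim_unchanged_templatize_function := by
  intro s etext etags tt _ hpre
  intro hnD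
  have htt : tt = 2 := hpre
  subst htt
  unfold templatize_function templatize_function_alt
  rw [if_pos rfl, if_pos rfl, pv_foldl_triple, pv_foldl_triple]
  refine Prod.ext rfl (Prod.ext ?_ rfl)
  simp only [List.nil_append]
  apply List.map_congr_left
  intro item hitem
  apply pv_entry_eq
  intro hmem
  rw [pv_map_fst_zip_take]
  by_contra hnt
  exact hnD ⟨rfl, item.1, List.mem_map.mpr ⟨item, hitem, rfl⟩, hmem, hnt⟩

theorem templatize_function_changed : Claim_changed_templatize_function := by
  unfold Claim_changed_templatize_function
  refine ⟨by decide, by decide, ?_, by decide, by decide, by decide⟩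
  exact ⟨rfl, "Rating", by decide, by decide, by decide⟩

theorem templatize_function_tight : Claim_exact_templatize_function := by
  intro s etext etags tt _ hpre hD heq
  obtain ⟨-, t, hk, ht, hnt⟩ := hD
  have htt : tt = 2 := hpre
  subst htt
  unfold templatize_function templatize_function_alt at heq
  rw [if_pos rfl, if_pos rfl, pv_foldl_triple, pv_foldl_triple] at heq
  have h2 := congrArg (fun x => x.2.1) heq
  simp only at h2
  have hmaps := List.append_cancel_left h2
  obtain ⟨item, hitem, hfst⟩ := List.mem_map.mp hk
  have hpoint := List.map_eq_map_iff.mp hmaps item hitem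
  rw [hfst] at hpoint
  have hz : t ∉ (List.zip etags etext).map Prod.fst := by
    rw [pv_map_fst_zip_take]; exact hnt
  rw [pv_bucket_get?, pv_zip_swap_filter, pv_filter_nil_of_not_mem t _ hz] at hpoint
  have hzc : ((List.zip etags etext).map Prod.fst).contains t = false := by
    simp only [List.contains_iff_mem] at *
    simpa using hz
  simp [List.contains_iff_mem.mpr ht, PySem.Dict.get?, PySem.Dict.empty] at hpoint
  rw [hzc] at hpoint
  simp only [Bool.false_eq_true, if_false] at hpoint
  exact absurd (hpoint ht) (by decide)
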